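-- pv_equiv track=rewrite | github.com/JuanLoncharich/Algoritmos2 | practicas/tp-ada/code/greedy.py | adminActividades
-- ===== SOURCE A (Python) =====
-- def adminActividades(tareas, inicio, fin):
--     keysDic = sorted(tareas, key=lambda x: x[1])
--
--     actividades = [keysDic[0]]
--     ultimaActividad = keysDic[0]
--
--     for tarea in keysDic[1:]:
--         if tarea[0] >= ultimaActividad[1]:
--             actividades.append(tarea)
--             ultimaActividad = tarea
--
--     return actividades
-- ===== SOURCE B (Python) =====
-- def adminActividades(tareas, inicio, fin):
--     # No sort: repeatedly pick the earliest-finishing remaining task (min is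
--     # stable: first occurrence on ties), then drop every task that overlaps it.
--     res = []
--     pend = list(tareas)
--     while pend:
--         best = min(pend, key=lambda t: t[1])
--         res.append(best)
--         pend.remove(best)
--         pend = [t for t in pend if t[0] >= best[1]]
--     return res
-- ===== Notes on version B (the rewrite author's own statement) =====
-- stated objective: alternative
-- what changed: B removes the sort entirely: instead of stable-sorting by finish time and scanning once, it repeatedly selects the earliest-finishing remaining task with min() (first occurrence on ties, matching the stable sort) and filters out every task that overlaps it.
import Mathlib
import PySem

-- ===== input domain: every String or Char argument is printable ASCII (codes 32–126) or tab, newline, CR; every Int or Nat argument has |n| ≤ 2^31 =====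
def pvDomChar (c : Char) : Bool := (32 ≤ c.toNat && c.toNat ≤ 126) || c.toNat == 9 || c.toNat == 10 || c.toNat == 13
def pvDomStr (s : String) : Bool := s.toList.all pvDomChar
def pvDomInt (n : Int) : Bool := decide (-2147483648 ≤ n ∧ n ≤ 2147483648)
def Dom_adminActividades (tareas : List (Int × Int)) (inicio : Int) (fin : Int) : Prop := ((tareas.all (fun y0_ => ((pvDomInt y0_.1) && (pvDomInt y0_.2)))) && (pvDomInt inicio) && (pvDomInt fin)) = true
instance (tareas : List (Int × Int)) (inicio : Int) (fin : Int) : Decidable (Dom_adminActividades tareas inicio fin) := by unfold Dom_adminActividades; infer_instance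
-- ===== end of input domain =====

-- B replaces sort-then-scan by a sort-free repeated selection of the earliest-finishing
-- compatible task (alternative decomposition, not claimed faster).

-- ===== PORT A =====
-- A: stable-sort by finish time, take the first unconditionally, then keep every
-- task whose start is at least the last kept finish.  (inicio/fin are unused by A.)
def adminActividades (tareas : List (Int × Int)) (inicio : Int) (fin : Int) : List (Int × Int) :=
  let keysDic := PySem.List.sorted tareas (fun x => x.2)
  match keysDic with
  | [] => []        -- Python raises IndexError on keysDic[0]; excluded by Pre_
  | k0 :: rest =>
    (rest.foldl (fun st tarea =>
        if st.2.2 ≤ tarea.1 then (st.1 ++ [tarea], tarea) else st) ([k0], k0)).1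

-- ===== PORT B =====
-- B's while loop: pick min(pend, key=finish) (first extremal on ties), remove it,
-- drop every remaining task that overlaps it.
def pvAltLoop (pend : List (Int × Int)) (res : List (Int × Int)) : List (Int × Int) :=
  match hb : PySem.List.min? pend (fun t => t.2) with
  | none => res                  -- pend empty: while loop ends
  | some best =>
    match hr : PySem.List.remove? pend best with
    | none => res                -- unreachable: best ∈ pend
    | some rest =>
      pvAltLoop (rest.filter (fun t => decide (best.2 ≤ t.1))) (res ++ [best])
termination_by pend.length
decreasing_by
  have hm : best ∈ pend := PySem.List.min?_mem hb
  have := PySem.List.remove?_eq_some_erase pend best hm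
  rw [hr] at this
  have hlen : rest.length = pend.length - 1 := by
    cases this; simp [List.length_erase_of_mem hm]
  have h1 : (rest.filter (fun t => decide (best.2 ≤ t.1))).length ≤ rest.length :=
    List.length_filter_le _ _
  have h0 : 0 < pend.length := List.length_pos_of_mem hm
  omega

def adminActividades_alt (tareas : List (Int × Int)) (inicio : Int) (fin : Int) : List (Int × Int) :=
  pvAltLoop tareas []

-- ===== PRECONDITION & SPEC =====
-- Pre_ excludes only the empty list, on which A raises IndexError (keysDic[0]).
def Pre_adminActividades (tareas : List (Int × Int)) (inicio : Int) (fin : Int) : Prop :=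
  tareas ≠ []
instance (tareas : List (Int × Int)) (inicio : Int) (fin : Int) : Decidable (Pre_adminActividades tareas inicio fin) := by unfold Pre_adminActividades; infer_instance

def pvWitness_adminActividades : (List (Int × Int)) × Int × Int := ([(1, 4), (5, 7), (3, 5)], 0, 10)

def Spec_adminActividades (tareas : List (Int × Int)) (inicio : Int) (fin : Int) (out : List (Int × Int)) : Prop := out = adminActividades_alt tareas inicio fin
instance (tareas : List (Int × Int)) (inicio : Int) (fin : Int) (out : List (Int × Int)) : Decidable (Spec_adminActividades tareas inicio fin out) := by unfold Spec_adminActividades; infer_instance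

-- ===== CLAIM (what is proved, stated in full; the proofs are below) =====
def Claim_equal_adminActividades : Prop := ∀ (tareas : List (Int × Int)) (inicio : Int) (fin : Int), Dom_adminActividades tareas inicio fin → Pre_adminActividades tareas inicio fin → Spec_adminActividades tareas inicio fin (adminActividades tareas inicio fin)


-- ===== LEMMAS AND PROOFS =====

-- Abbreviations used only by the proofs.
def pvS (l : List (Int × Int)) : List (Int × Int) := PySem.List.sorted l (fun t => t.2)
def pvIns (x : Int × Int) (ys : List (Int × Int)) : List (Int × Int) :=
  PySem.List.insertBy (fun a b => decide (a.2 < b.2)) x ys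

-- The recursive form of A's greedy scan.
def pvG : List (Int × Int) → Int → List (Int × Int)
  | [], _ => []
  | t :: ts, last => if last ≤ t.1 then t :: pvG ts t.2 else pvG ts last

lemma pvFoldA (s : List (Int × Int)) : ∀ (acc : List (Int × Int)) (u : Int × Int),
    (s.foldl (fun st tarea =>
        if st.2.2 ≤ tarea.1 then (st.1 ++ [tarea], tarea) else st) (acc, u)).1
      = acc ++ pvG s u.2 := by
  induction s with
  | nil => intro acc u; simp [pvG]
  | cons t ts ih =>
    intro acc u
    by_cases h : u.2 ≤ t.1
    · simp [List.foldl_cons, h, pvG, ih]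
    · simp [List.foldl_cons, h, pvG, ih]

lemma pvA_eq (tareas : List (Int × Int)) (inicio fin : Int) :
    adminActividades tareas inicio fin
      = match pvS tareas with
        | [] => []
        | m :: t => m :: pvG t m.2 := by
  unfold adminActividades pvS
  cases h : PySem.List.sorted tareas (fun t => t.2) with
  | nil => simp
  | cons m t => simp [pvFoldA]

lemma pvIns_nil (x : Int × Int) : pvIns x [] = [x] := by
  simp [pvIns, PySem.List.insertBy]

lemma pvIns_cons (x y : Int × Int) (ys : List (Int × Int)) :
    pvIns x (y :: ys) = if x.2 < y.2 then x :: y :: ys else y :: pvIns x ys := by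
  simp [pvIns, PySem.List.insertBy]

lemma pvIns_front (x : Int × Int) (ys : List (Int × Int))
    (h : ∀ y ∈ ys, x.2 < y.2) : pvIns x ys = x :: ys := by
  cases ys with
  | nil => exact pvIns_nil x
  | cons y t => rw [pvIns_cons]; simp [h y (List.mem_cons_self)]

lemma pvS_snoc (l : List (Int × Int)) (x : Int × Int) :
    pvS (l ++ [x]) = pvIns x (pvS l) := by
  unfold pvS pvIns
  rw [PySem.List.sorted_eq_foldl_insertBy, PySem.List.sorted_eq_foldl_insertBy]
  simp [List.foldl_append]

lemma pvS_pairwise (l : List (Int × Int)) :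
    (pvS l).Pairwise (fun a b => a.2 ≤ b.2) :=
  PySem.List.sorted_pairwise l (fun t => t.2)

-- min? computed by the running-minimum loop.
def pvMinF : List (Int × Int) → (Int × Int) → (Int × Int)
  | [], b => b
  | y :: t, b => pvMinF t (if y.2 < b.2 then y else b)

lemma pvMin?_shift (b y : Int × Int) (t : List (Int × Int)) :
    PySem.List.min? (b :: y :: t) (fun t => t.2)
      = PySem.List.min? ((if y.2 < b.2 then y else b) :: t) (fun t => t.2) := by
  by_cases h : y.2 < b.2 <;> simp [PySem.List.min?, h]

lemma pvMin?_cons (t : List (Int × Int)) : ∀ (b : Int × Int),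
    PySem.List.min? (b :: t) (fun t => t.2) = some (pvMinF t b) := by
  induction t with
  | nil => intro b; simp [PySem.List.min?, pvMinF]
  | cons y t ih => intro b; rw [pvMin?_shift, ih, pvMinF]

lemma pvMinF_snoc (t : List (Int × Int)) : ∀ (b x : Int × Int),
    pvMinF (t ++ [x]) b = if x.2 < (pvMinF t b).2 then x else pvMinF t b := by
  induction t with
  | nil => intro b x; simp [pvMinF]
  | cons y t ih => intro b x; rw [List.cons_append, pvMinF, ih, pvMinF]

lemma pvMin?_singleton (x : Int × Int) :
    PySem.List.min? [x] (fun t => t.2) = some x := by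
  simp [PySem.List.min?]

lemma pvMin?_snoc (l : List (Int × Int)) (x m : Int × Int)
    (h : PySem.List.min? l (fun t => t.2) = some m) :
    PySem.List.min? (l ++ [x]) (fun t => t.2)
      = some (if x.2 < m.2 then x else m) := by
  cases l with
  | nil => simp [PySem.List.min?] at h
  | cons b t =>
    rw [pvMin?_cons] at h
    injection h with h
    rw [List.cons_append, pvMin?_cons, pvMinF_snoc, h]

-- L1: the head of the stable sort is Python's min (first extremal element).
lemma pvL1 (l : List (Int × Int)) : ∀ {m : Int × Int} {t : List (Int × Int)},
    pvS l = m :: t → PySem.List.min? l (fun t => t.2) = some m := by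
  induction l using List.reverseRecOn with
  | nil => intro m t h; simp [pvS, PySem.List.sorted] at h
  | append_singleton l x ih =>
    intro m t h
    rw [pvS_snoc] at h
    cases hS : pvS l with
    | nil =>
      rw [hS, pvIns_nil] at h
      cases h
      have hl : l = [] := by
        have := (PySem.List.sorted_eq_nil_iff l (fun t : Int × Int => t.2) false).mp hS
        exact this
      subst hl
      exact pvMin?_singleton x
    | cons m' t' =>
      rw [hS, pvIns_cons] at h
      rw [pvMin?_snoc l x m' (ih hS)]
      by_cases hx : x.2 < m'.2
      · rw [if_pos hx] at h
        cases h
        simp [hx]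
      · rw [if_neg hx] at h
        cases h
        simp [hx]

-- helpers for L2 (erase commutes with the stable sort)
lemma pvErase_ins_not_mem (a : Int × Int) (ys : List (Int × Int)) (h : a ∉ ys) :
    (pvIns a ys).erase a = ys := by
  induction ys with
  | nil => simp [pvIns_nil]
  | cons y t ih =>
    have hya : ¬ (y = a) := fun e => h (e ▸ List.mem_cons_self)
    have hat : a ∉ t := fun e => h (List.mem_cons_of_mem _ e)
    rw [pvIns_cons]
    by_cases hk : a.2 < y.2
    · simp [hk, List.erase_cons_head]
    · simp only [hk, if_false]
      rw [List.erase_cons_tail (by simp [hya]), ih hat]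

lemma pvErase_ins_mem (x a : Int × Int) : ∀ (ys : List (Int × Int)),
    a ∈ ys → ys.Pairwise (fun p q => p.2 ≤ q.2) →
    (pvIns x ys).erase a = pvIns x (ys.erase a) := by
  intro ys
  induction ys with
  | nil => intro h; exact absurd h (List.not_mem_nil)
  | cons y t ih =>
    intro ha hpw
    have hy : ∀ z ∈ t, y.2 ≤ z.2 := (List.pairwise_cons.mp hpw).1
    have hpt : t.Pairwise (fun p q => p.2 ≤ q.2) := (List.pairwise_cons.mp hpw).2
    rw [pvIns_cons]
    by_cases hk : x.2 < y.2
    · rw [if_pos hk]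
      have hya : y.2 ≤ a.2 := by
        rcases List.mem_cons.mp ha with h | h
        · exact h ▸ le_refl _
        · exact hy a h
      have hxa : ¬ (x = a) := by
        intro e; subst e; exact absurd (lt_of_lt_of_le hk hya) (lt_irrefl _)
      rw [List.erase_cons_tail (by simp [hxa])]
      by_cases hyaeq : y = a
      · subst hyaeq
        rw [List.erase_cons_head]
        exact (pvIns_front x t (fun z hz => lt_of_lt_of_le hk (hy z hz))).symm
      · rw [List.erase_cons_tail (by simp [hyaeq]), pvIns_cons, if_pos hk]
    · rw [if_neg hk]
      by_cases hyaeq : y = a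
      · subst hyaeq
        rw [List.erase_cons_head, List.erase_cons_head]
      · have hat : a ∈ t := by
          rcases List.mem_cons.mp ha with h | h
          · exact absurd h.symm hyaeq
          · exact h
        rw [List.erase_cons_tail (by simp [hyaeq]),
            List.erase_cons_tail (by simp [hyaeq]),
            ih hat hpt, pvIns_cons, if_neg hk]

-- L2: erase commutes with the stable sort.
lemma pvL2 (l : List (Int × Int)) : ∀ (a : Int × Int), pvS (l.erase a) = (pvS l).erase a := by
  induction l using List.reverseRecOn with
  | nil => intro a; simp [pvS, PySem.List.sorted]
  | append_singleton l x ih =>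
    intro a
    by_cases ha : a ∈ l
    · rw [List.erase_append_left _ ha, pvS_snoc, pvS_snoc, ih a]
      exact (pvErase_ins_mem x a (pvS l)
        ((PySem.List.mem_sorted l (fun t : Int × Int => t.2) false a).mpr ha)
        (pvS_pairwise l)).symm
    · by_cases hxa : x = a
      · subst hxa
        rw [List.erase_append_right _ ha]
        simp only [List.erase_cons_head, List.append_nil]
        rw [pvS_snoc]
        exact (pvErase_ins_not_mem x (pvS l)
          (fun hm => ha ((PySem.List.mem_sorted l (fun t : Int × Int => t.2) false x).mp hm))).symm
      · have hnot : a ∉ l ++ [x] := by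
          intro hm
          rcases List.mem_append.mp hm with h | h
          · exact ha h
          · exact hxa (List.mem_singleton.mp h).symm
        have hnotS : a ∉ pvIns x (pvS l) := by
          intro hm
          rcases (PySem.List.mem_insertBy _ x a (pvS l)).mp hm with h | h
          · exact hxa h.symm
          · exact ha ((PySem.List.mem_sorted l (fun t : Int × Int => t.2) false a).mp h)
        rw [List.erase_of_not_mem hnot, pvS_snoc, List.erase_of_not_mem hnotS]

-- helpers for L3 (filter commutes with the stable sort)
lemma pvFilter_ins_neg (p : Int × Int → Bool) (x : Int × Int) (hp : p x = false) :
    ∀ (ys : List (Int × Int)), (pvIns x ys).filter p = ys.filter p := by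
  intro ys
  induction ys with
  | nil => simp [pvIns_nil, hp]
  | cons y t ih =>
    rw [pvIns_cons]
    by_cases hk : x.2 < y.2
    · simp [hk, hp]
    · simp only [hk, if_false, List.filter_cons]
      cases hpy : p y <;> simp [ih]

lemma pvFilter_ins_pos (p : Int × Int → Bool) (x : Int × Int) (hp : p x = true) :
    ∀ (ys : List (Int × Int)), ys.Pairwise (fun a b => a.2 ≤ b.2) →
    (pvIns x ys).filter p = pvIns x (ys.filter p) := by
  intro ys
  induction ys with
  | nil => simp [pvIns_nil, hp]
  | cons y t ih =>
    intro hpw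
    have hy : ∀ z ∈ t, y.2 ≤ z.2 := (List.pairwise_cons.mp hpw).1
    have hpt : t.Pairwise (fun a b : Int × Int => a.2 ≤ b.2) := (List.pairwise_cons.mp hpw).2
    rw [pvIns_cons]
    by_cases hk : x.2 < y.2
    · rw [if_pos hk]
      cases hpy : p y
      · have : (y :: t).filter p = t.filter p := by simp [hpy]
        rw [this]
        have hfront : pvIns x (t.filter p) = x :: t.filter p := by
          apply pvIns_front
          intro z hz
          exact lt_of_lt_of_le hk (hy z (List.mem_of_mem_filter hz))
        simp [hp, hpy, hfront]
      · simp [hp, hpy, pvIns_cons, hk]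
    · rw [if_neg hk]
      cases hpy : p y
      · have h1 : (y :: t).filter p = t.filter p := by simp [hpy]
        have h2 : (y :: pvIns x t).filter p = (pvIns x t).filter p := by simp [hpy]
        rw [h2, h1, ih hpt]
      · have h1 : (y :: t).filter p = y :: t.filter p := by simp [hpy]
        have h2 : (y :: pvIns x t).filter p = y :: (pvIns x t).filter p := by simp [hpy]
        rw [h2, h1, ih hpt, pvIns_cons, if_neg hk]

-- L3: filter commutes with the stable sort.
lemma pvL3 (p : Int × Int → Bool) (l : List (Int × Int)) :
    pvS (l.filter p) = (pvS l).filter p := by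
  induction l using List.reverseRecOn with
  | nil => simp [pvS, PySem.List.sorted]
  | append_singleton l x ih =>
    cases hp : p x
    · have h1 : (l ++ [x]).filter p = l.filter p := by simp [hp]
      rw [h1, ih, pvS_snoc, pvFilter_ins_neg p x hp]
    · have h1 : (l ++ [x]).filter p = l.filter p ++ [x] := by simp [hp]
      rw [h1, pvS_snoc, pvS_snoc, ih, pvFilter_ins_pos p x hp _ (pvS_pairwise l)]

-- greedy-scan skipping lemmas
lemma pvG_nil_of_all_lt (s : List (Int × Int)) (c : Int)
    (h : ∀ e ∈ s, e.1 < c) : pvG s c = [] := by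
  induction s with
  | nil => rfl
  | cons t ts ih =>
    have : ¬ (c ≤ t.1) := not_le.mpr (h t List.mem_cons_self)
    simp only [pvG, this, if_false]
    exact ih (fun e he => h e (List.mem_cons_of_mem _ he))

lemma pvG_skip (u v : List (Int × Int)) (c : Int)
    (h : ∀ e ∈ u, e.1 < c) : pvG (u ++ v) c = pvG v c := by
  induction u with
  | nil => rfl
  | cons t ts ih =>
    have : ¬ (c ≤ t.1) := not_le.mpr (h t List.mem_cons_self)
    simp only [List.cons_append, pvG, this, if_false]
    exact ih (fun e he => h e (List.mem_cons_of_mem _ he))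

-- erase commutes with filter when the erased value satisfies the predicate
lemma pvErase_filter (p : Int × Int → Bool) (a : Int × Int) (hp : p a = true) :
    ∀ (l : List (Int × Int)), (l.filter p).erase a = (l.erase a).filter p := by
  intro l
  induction l with
  | nil => rfl
  | cons x l ih =>
    by_cases hxa : x = a
    · subst hxa
      simp [hp, List.erase_cons_head]
    · rw [List.erase_cons_tail (by simp [hxa])]
      cases hpx : p x
      · have h1 : (x :: l).filter p = l.filter p := by simp [hpx]
        have h2 : (x :: l.erase a).filter p = (l.erase a).filter p := by simp [hpx]
        rw [h1, h2, ih]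
      · have h1 : (x :: l).filter p = x :: l.filter p := by simp [hpx]
        have h2 : (x :: l.erase a).filter p = x :: (l.erase a).filter p := by simp [hpx]
        rw [h1, h2, List.erase_cons_tail (by simp [hxa]), ih]

lemma pvFilter_filter_absorb (p q : Int × Int → Bool)
    (h : ∀ e, q e = true → p e = true) :
    ∀ (l : List (Int × Int)), (l.filter p).filter q = l.filter q := by
  intro l
  induction l with
  | nil => rfl
  | cons x l ih =>
    cases hqx : q x
    · cases hpx : p x <;> simp [hpx, hqx, ih]
    · have hpx : p x = true := h x hqx
      simp [hpx, hqx, ih]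

-- unfolding lemmas for pvAltLoop
lemma pvAltLoop_none (pend res : List (Int × Int))
    (h : PySem.List.min? pend (fun t => t.2) = none) : pvAltLoop pend res = res := by
  rw [pvAltLoop]
  split
  · rfl
  · rename_i best hb
    rw [h] at hb; cases hb

lemma pvAltLoop_some (pend res rest : List (Int × Int)) (best : Int × Int)
    (h1 : PySem.List.min? pend (fun t => t.2) = some best)
    (h2 : PySem.List.remove? pend best = some rest) :
    pvAltLoop pend res
      = pvAltLoop (rest.filter (fun t => decide (best.2 ≤ t.1))) (res ++ [best]) := by
  rw [pvAltLoop]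
  split
  · rename_i hb; rw [h1] at hb; cases hb
  · rename_i best' hb
    rw [h1] at hb; cases hb
    split
    · rename_i hr; rw [h2] at hr; cases hr
    · rename_i rest' hr
      rw [h2] at hr; cases hr
      rfl

-- Main simulation lemma: B's loop on the compatible tasks equals A's greedy scan
-- over the stable sort, given that every remaining task with finish below `last`
-- also starts before `last` (so it can never be selected again).
lemma pvMain : ∀ (n : Nat) (rem : List (Int × Int)) (last : Int) (acc : List (Int × Int)),
    rem.length ≤ n →
    (∀ e ∈ rem, e.1 < last ∨ last ≤ e.2) →
    pvAltLoop (rem.filter (fun t => decide (last ≤ t.1))) acc = acc ++ pvG (pvS rem) last := by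
  intro n
  induction n with
  | zero =>
    intro rem last acc hn _
    have : rem = [] := List.length_eq_zero_iff.mp (Nat.le_zero.mp hn)
    subst this
    rw [pvAltLoop_none _ _ (by simp [PySem.List.min?])]
    simp [pvS, PySem.List.sorted, pvG]
  | succ n ih =>
    intro rem last acc hn hC
    cases hp : rem.filter (fun t => decide (last ≤ t.1)) with
    | nil =>
      rw [pvAltLoop_none _ _ (by simp [PySem.List.min?])]
      have hall : ∀ e ∈ pvS rem, e.1 < last := by
        intro e he
        have hmem : e ∈ rem := (PySem.List.mem_sorted rem (fun t : Int × Int => t.2) false e).mp he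
        have := List.filter_eq_nil_iff.mp hp e hmem
        simpa using this
      rw [pvG_nil_of_all_lt _ _ hall]
      simp
    | cons c cs =>
      -- pend nonempty
      rw [← hp]
      set p : Int × Int → Bool := fun t => decide (last ≤ t.1) with hpdef
      have hpend_ne : rem.filter p ≠ [] := by rw [hp]; simp
      have hSpend_ne : pvS (rem.filter p) ≠ [] := by
        intro h
        exact hpend_ne ((PySem.List.sorted_eq_nil_iff _ _ _).mp h)
      cases hSp : pvS (rem.filter p) with
      | nil => exact absurd hSp hSpend_ne
      | cons m' t' =>
        have hmin : PySem.List.min? (rem.filter p) (fun t => t.2) = some m' := pvL1 _ hSp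
        have hm'pend : m' ∈ rem.filter p := PySem.List.min?_mem hmin
        have hm'rem : m' ∈ rem := List.mem_of_mem_filter hm'pend
        have hpm' : p m' = true := List.of_mem_filter hm'pend
        have hlastm'1 : last ≤ m'.1 := by simpa [hpdef] using hpm'
        have hlastm'2 : last ≤ m'.2 := by
          rcases hC m' hm'rem with h | h
          · exact absurd hlastm'1 (not_le.mpr h)
          · exact h
        have hrem' : PySem.List.remove? (rem.filter p) m' = some ((rem.filter p).erase m') :=
          PySem.List.remove?_eq_some_erase _ _ hm'pend
        set q : Int × Int → Bool := fun t => decide (m'.2 ≤ t.1) with hqdef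
        -- rewrite B's next pend
        have harg : ((rem.filter p).erase m').filter q = (rem.erase m').filter q := by
          rw [pvErase_filter p m' hpm', pvFilter_filter_absorb p q]
          intro e he
          simp only [hqdef] at he
          simp only [hpdef]
          have : m'.2 ≤ e.1 := of_decide_eq_true he
          exact decide_eq_true (le_trans hlastm'2 this)
        -- the invariant for the recursive call
        have hC2 : ∀ e ∈ rem.erase m', e.1 < m'.2 ∨ m'.2 ≤ e.2 := by
          intro e he
          have herem : e ∈ rem := List.mem_of_mem_erase he
          rcases hC e herem with h | h
          · exact Or.inl (lt_of_lt_of_le h hlastm'2)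
          · by_cases hpe : last ≤ e.1
            · have hepend : e ∈ rem.filter p := by
                rw [List.mem_filter]
                exact ⟨herem, by simp [hpdef, hpe]⟩
              exact Or.inr (PySem.List.min?_isMin hmin e hepend)
            · exact Or.inl (lt_of_lt_of_le (not_le.mp hpe) hlastm'2)
        have hlen2 : (rem.erase m').length ≤ n := by
          have h0 : 0 < rem.length := List.length_pos_of_mem hm'rem
          have := List.length_erase_of_mem hm'rem
          omega
        have hIH := ih (rem.erase m') m'.2 (acc ++ [m']) hlen2 hC2
        -- decompose the sorted list around m'
        have hfilterS : (pvS rem).filter p = m' :: t' := by rw [← pvL3, hSp]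
        obtain ⟨u, v, hdecomp, hu, hv⟩ := (List.filter_eq_cons_iff.mp hfilterS)
        have hu' : ∀ e ∈ u, e.1 < last := by
          intro e he
          have h := hu e he
          simp [hpdef, not_le] at h
          exact h
        have hm'notu : m' ∉ u := by
          intro hmem
          have h := hu m' hmem
          simp [hpdef, not_le] at h
          exact absurd hlastm'1 (not_le.mpr h)
        -- compute A's greedy over the sorted list
        have hGrem : pvG (pvS rem) last = m' :: pvG v m'.2 := by
          rw [hdecomp, pvG_skip u _ last hu']
          simp [pvG, hlastm'1]
        -- B's recursion target equals pvG v m'.2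
        have hSrem2 : pvS (rem.erase m') = u ++ v := by
          rw [pvL2, hdecomp, List.erase_append_right _ hm'notu, List.erase_cons_head]
        have hGv : pvG (pvS (rem.erase m')) m'.2 = pvG v m'.2 := by
          rw [hSrem2]
          exact pvG_skip u v m'.2 (fun e he => lt_of_lt_of_le (hu' e he) hlastm'2)
        calc pvAltLoop (rem.filter p) acc
            = pvAltLoop (((rem.filter p).erase m').filter q) (acc ++ [m']) :=
              pvAltLoop_some _ _ _ _ hmin hrem'
          _ = pvAltLoop ((rem.erase m').filter q) (acc ++ [m']) := by rw [harg]
          _ = (acc ++ [m']) ++ pvG (pvS (rem.erase m')) m'.2 := hIH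
          _ = acc ++ (m' :: pvG v m'.2) := by rw [hGv]; simp
          _ = acc ++ pvG (pvS rem) last := by rw [hGrem]

-- ===== VERDICT (by name: the statement is the Claim_ definition above) =====
theorem adminActividades_spec : Claim_equal_adminActividades := by
  intro tareas inicio fin _ hpre
  unfold Spec_adminActividades adminActividades_alt
  rw [pvA_eq]
  cases hS : pvS tareas with
  | nil => exact absurd ((PySem.List.sorted_eq_nil_iff _ _ _).mp hS) hpre
  | cons m t =>
    have hmin : PySem.List.min? tareas (fun t => t.2) = some m := pvL1 _ hS
    have hmem : m ∈ tareas := PySem.List.min?_mem hmin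
    have hrem : PySem.List.remove? tareas m = some (tareas.erase m) :=
      PySem.List.remove?_eq_some_erase _ _ hmem
    rw [pvAltLoop_some _ _ _ _ hmin hrem]
    have hC : ∀ e ∈ tareas.erase m, e.1 < m.2 ∨ m.2 ≤ e.2 := by
      intro e he
      exact Or.inr (PySem.List.key_head_sorted_le tareas (fun t : Int × Int => t.2) hS e
        (List.mem_of_mem_erase he))
    have hmain := pvMain (tareas.erase m).length (tareas.erase m) m.2 [m] (le_refl _) hC
    have hS2 : pvS (tareas.erase m) = t := by rw [pvL2, hS, List.erase_cons_head]
    rw [hS2] at hmain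
    rw [List.nil_append, hmain]
    simp
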